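-- pv_equiv track=rewrite | github.com/rkurchin/dennis_beer | functions.py | categorize_style
-- ===== SOURCE A (Python) =====
-- def categorize_style(style, style_dict, priority_list):
--     match_dict = {key:False for key in style_dict.keys()}
--     for key in style_dict.keys():
--         if key in style:
--             match_dict[key] = True
--     if not any(match_dict.values()):
--         return "Other"
--     else:
--         options = [style_dict[k] for k in match_dict.keys() if match_dict[k]]
--         if len(options)==1:
--             return options[0]
--         else: # need to prioritize, find first one in priority list that is in options
--             for option in priority_list:
--                 if option in options:
--                     return option
-- ===== SOURCE B (Python) =====
-- def categorize_style(style, style_dict, priority_list):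
--     # Single pass over the dict items with an accumulator (count, first match,
--     # best-ranked match); a value->priority-rank dict built once replaces A's
--     # boolean match_dict, the options list and A's scan of priority_list.
--     rank = {}
--     for i, p in enumerate(priority_list):
--         rank.setdefault(p, i)
--     count = 0
--     first = None
--     best = None  # (rank, value) with minimal rank among matched values
--     for key, value in style_dict.items():
--         if key in style:
--             count += 1
--             if count == 1:
--                 first = value
--             r = rank.get(value)
--             if r is not None and (best is None or r < best[0]):
--                 best = (r, value)
--     if count == 0:
--         return "Other"
--     if count == 1:
--         return first
--     return best[1] if best is not None else None
-- ===== Notes on version B (the rewrite author's own statement) =====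
-- stated objective: alternative
-- what changed: B replaces A's boolean match_dict, options list and scan of priority_list by a single pass over the dict items maintaining (count, first match, best-ranked match), ranking values through a value->priority-index dict built once, so the inner 'option in options' scan disappears.
-- outside the precondition, e.g. on categorize_style('xx', {'x': 'A', 'xx': 'B'}, []): A returns None, B returns None
import Mathlib
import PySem

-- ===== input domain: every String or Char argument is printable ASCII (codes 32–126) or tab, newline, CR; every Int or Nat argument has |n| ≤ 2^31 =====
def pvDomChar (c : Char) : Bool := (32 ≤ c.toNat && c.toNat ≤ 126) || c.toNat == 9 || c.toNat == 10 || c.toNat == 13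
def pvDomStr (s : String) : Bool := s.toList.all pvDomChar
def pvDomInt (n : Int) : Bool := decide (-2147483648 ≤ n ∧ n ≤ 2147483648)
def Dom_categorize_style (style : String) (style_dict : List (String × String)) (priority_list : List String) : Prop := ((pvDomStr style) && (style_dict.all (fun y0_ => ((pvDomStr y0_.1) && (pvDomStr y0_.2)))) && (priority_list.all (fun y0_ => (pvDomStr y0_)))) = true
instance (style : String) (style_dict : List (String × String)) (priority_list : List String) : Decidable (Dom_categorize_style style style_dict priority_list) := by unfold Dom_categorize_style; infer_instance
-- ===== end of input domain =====

-- B replaces A's boolean match_dict, options list and priority_list scan by a single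
-- pass over the dict items with an accumulator (count, first match, best-ranked match),
-- ranking values through a value->priority-index dict built once; objective: alternative.


-- ===== PORT A =====
-- 'for option in priority_list: if option in options: return option' as a recursion;
-- the fall-through returns "" where Python returns None (those inputs are outside Pre_).
def firstInA (priority_list : List String) (options : List String) : String :=
  match priority_list with
  | [] => ""
  | p :: rest => if options.contains p then p else firstInA rest options

def categorize_style (style : String) (style_dict : List (String × String)) (priority_list : List String) : String :=
  let d := PySem.Dict.ofList style_dict
  -- match_dict = {key: False for key in style_dict.keys()}
  let md0 : PySem.Dict String Bool := PySem.Dict.ofList (d.keys.map (fun k => (k, false)))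
  -- for key in style_dict.keys(): if key in style: match_dict[key] = True
  let md := d.keys.foldl (fun m k => if PySem.Str.isIn k style then m.insert k true else m) md0
  if !(md.values.any (fun b => b)) then "Other"
  else
    -- options = [style_dict[k] for k in match_dict.keys() if match_dict[k]]
    -- k is a key of both dicts, so the getD defaults are never read (no KeyError).
    let options := (md.keys.filter (fun k => md.getD k false)).map (fun k => d.getD k "")
    if options.length == 1 then (PySem.List.pyGet? options 0).getD ""   -- in range: length = 1
    else firstInA priority_list options

-- ===== PORT B =====
-- the body of B's 'for key, value in style_dict.items()' loop, as a step function
def bstepB (rank : PySem.Dict String Int) (style : String)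
    (st : Nat × Option String × Option (Int × String)) (kv : String × String) :
    Nat × Option String × Option (Int × String) :=
  if PySem.Str.isIn kv.1 style then
    let c := st.1 + 1
    let f := if c == 1 then some kv.2 else st.2.1
    -- r = rank.get(value); if r is not None and (best is None or r < best[0]): best = (r, value)
    let b := match rank.get? kv.2 with
      | none => st.2.2
      | some r => match st.2.2 with
        | none => some (r, kv.2)
        | some b0 => if r < b0.1 then some (r, kv.2) else some b0
    (c, f, b)
  else st

def categorize_style_alt (style : String) (style_dict : List (String × String)) (priority_list : List String) : String :=
  -- rank = {}; for i, p in enumerate(priority_list): rank.setdefault(p, i)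
  let rank := (PySem.List.enumerate priority_list 0).foldl
    (fun d ip => d.setdefault ip.2 ip.1) (PySem.Dict.empty : PySem.Dict String Int)
  -- count = 0; first = None; best = None; for key, value in style_dict.items(): …
  let st := (PySem.Dict.ofList style_dict).items.foldl (bstepB rank style) (0, none, none)
  if st.1 == 0 then "Other"
  else if st.1 == 1 then st.2.1.getD ""   -- count == 1: first was set at the single match
  else
    -- return best[1] if best is not None else None; None is outside Pre_
    match st.2.2 with
    | none => ""
    | some b => b.2

-- ===== PRECONDITION & SPEC =====
-- A falls off the end of its final loop and returns None (not a str) exactly when two or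
-- more dict keys match the style and none of the matched values occurs in priority_list;
-- Pre_ excludes those inputs (B returns None there too).
def Pre_categorize_style (style : String) (style_dict : List (String × String)) (priority_list : List String) : Prop :=
  let opts := ((PySem.Dict.ofList style_dict).items.filter (fun kv => PySem.Str.isIn kv.1 style)).map Prod.snd
  opts.length ≤ 1 ∨ ∃ p ∈ priority_list, p ∈ opts
instance (style : String) (style_dict : List (String × String)) (priority_list : List String) : Decidable (Pre_categorize_style style style_dict priority_list) := by unfold Pre_categorize_style; infer_instance

def pvWitness_categorize_style : String × (List (String × String)) × List String :=
  ("hazy ipa", [("ipa", "IPA"), ("stout", "Stout")], ["Stout", "IPA"])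

def Spec_categorize_style (style : String) (style_dict : List (String × String)) (priority_list : List String) (out : String) : Prop := out = categorize_style_alt style style_dict priority_list
instance (style : String) (style_dict : List (String × String)) (priority_list : List String) (out : String) : Decidable (Spec_categorize_style style style_dict priority_list out) := by unfold Spec_categorize_style; infer_instance

-- ===== CLAIM (what is proved, stated in full; the proofs are below) =====
def Claim_equal_categorize_style : Prop := ∀ (style : String) (style_dict : List (String × String)) (priority_list : List String), Dom_categorize_style style style_dict priority_list → Pre_categorize_style style style_dict priority_list → Spec_categorize_style style style_dict priority_list (categorize_style style style_dict priority_list)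

-- ===== LEMMAS AND PROOFS =====

-- ---- A-side lemmas ----

-- A's update loop over the distinct keys ks records exactly 'c k' for every key k.
theorem md_loop_items (c : String → Bool) :
    ∀ (ks : List String) (xs : List (String × Bool)) (m : PySem.Dict String Bool),
      m.items = xs ++ ks.map (fun k => (k, false)) →
      (xs.map Prod.fst ++ ks).Nodup →
      (ks.foldl (fun m k => if c k then m.insert k true else m) m).items
        = xs ++ ks.map (fun k => (k, c k)) := by
  intro ks
  induction ks with
  | nil => intro xs m hm _; simpa using hm
  | cons k rest ih =>
    intro xs m hm hnd
    have hkxs : k ∉ xs.map Prod.fst := by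
      have := List.disjoint_of_nodup_append hnd
      intro hk; exact this hk (by simp)
    have hkrest : k ∉ rest := by
      have := ((List.nodup_append.mp hnd).2.1)
      exact (List.nodup_cons.mp this).1
    have hstep : (if c k then m.insert k true else m).items
        = (xs ++ [(k, c k)]) ++ rest.map (fun k => (k, false)) := by
      by_cases hc : c k
      · have hmem : k ∈ m.keys := by
          simp only [PySem.Dict.keys, hm]; simp
        have hcont : m.contains k = true := (PySem.Dict.contains_iff_mem_keys m k).mpr hmem
        rw [if_pos hc, PySem.Dict.items_insert_of_contains m true hcont, hm]
        have hxs : List.map (fun p => if (p.1 == k) = true then (k, true) else p) xs = xs := by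
          conv_rhs => rw [← List.map_id xs]
          apply List.map_congr_left; intro p hp
          have : p.1 ≠ k := fun h => hkxs (List.mem_map.mpr ⟨p, hp, h⟩)
          simp [this]
        have hrest : List.map (fun p => if (p.1 == k) = true then (k, true) else p)
            (List.map (fun r => (r, false)) rest) = List.map (fun r => (r, false)) rest := by
          rw [List.map_map]
          apply List.map_congr_left; intro r hr
          have : r ≠ k := fun h => hkrest (h ▸ hr)
          simp [this]
        rw [List.map_append]
        simp only [List.map_cons]
        rw [hxs, hrest]
        simp [hc]
      · rw [if_neg hc, hm]
        simp [hc]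
    have := ih (xs ++ [(k, c k)]) _ hstep (by
      simp only [List.map_append, List.map_cons, List.map_nil]
      have : xs.map Prod.fst ++ [k] ++ rest = xs.map Prod.fst ++ k :: rest := by simp
      simpa [this] using hnd)
    simpa using this

-- lookup of a member pair in a dict with distinct keys
theorem getD_of_mem_items_nodup {κ ν : Type} [BEq κ] [LawfulBEq κ]
    (d : PySem.Dict κ ν) (kv : κ × ν) (hkv : kv ∈ d.items) (hnd : d.keys.Nodup) (d0 : ν) :
    d.getD kv.1 d0 = kv.2 := by
  have := PySem.Dict.get?_of_mem_items (d := d) (k := kv.1) (v := kv.2) (by simpa using hkv) hnd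
  exact PySem.Dict.getD_of_get?_eq_some _ _ this

-- A's options comprehension and B's matched values are the same list.
theorem options_eq_matched (c : String → Bool) (f : String → String) :
    ∀ (L : List (String × String)), (∀ kv ∈ L, f kv.1 = kv.2) →
      ((L.map Prod.fst).filter c).map f = (L.filter (fun kv => c kv.1)).map Prod.snd := by
  intro L
  induction L with
  | nil => intro _; rfl
  | cons kv t ih =>
    intro h
    have hkv : f kv.1 = kv.2 := h kv (by simp)
    have ht := ih (fun p hp => h p (by simp [hp]))
    by_cases hc : c kv.1 <;> simp [hc, hkv, ht]

-- ---- B-side lemmas ----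

-- B's best-update, keyed by first-occurrence index in pl (what rank.get gives)
def bminIdx (pl : List String) (b : Option (Int × String)) (v : String) : Option (Int × String) :=
  match PySem.List.index? pl v with
  | none => b
  | some n => match b with
    | none => some ((n : Int), v)
    | some b0 => if (n : Int) < b0.1 then some ((n : Int), v) else some b0

-- the rank dict built by B's setdefault loop holds each value's first-occurrence index
theorem rank_get (v : String) : ∀ (pl : List String) (j : Int) (d : PySem.Dict String Int),
    ((PySem.List.enumerate pl j).foldl (fun d ip => d.setdefault ip.2 ip.1) d).get? v
      = (d.get? v).or ((PySem.List.index? pl v).map (fun n => (n : Int) + j)) := by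
  intro pl
  induction pl with
  | nil => intro j d; simp [PySem.List.enumerate_nil, PySem.List.index?_eq_idxOf?]
  | cons p t ih =>
    intro j d
    rw [PySem.List.enumerate_cons, List.foldl_cons]
    rw [ih (j + 1) (d.setdefault p j)]
    by_cases hv : v = p
    · subst hv
      rw [PySem.Dict.get?_setdefault_self, PySem.List.index?_cons_self]
      cases hgd : d.get? v with
      | none => simp
      | some x => simp
    · rw [PySem.Dict.get?_setdefault_of_ne (hne := hv),
        PySem.List.index?_cons_of_ne _ (fun h => hv h.symm)]
      cases hix : PySem.List.index? t v with
      | none => simp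
      | some n =>
        simp only [Option.map_some]
        have he : ((n : Int) + (j + 1)) = (((n + 1 : Nat)) : Int) + j := by push_cast; ring
        simp [he]

theorem rank_get0 (pl : List String) (v : String) :
    ((PySem.List.enumerate pl 0).foldl (fun d ip => d.setdefault ip.2 ip.1)
        (PySem.Dict.empty : PySem.Dict String Int)).get? v
      = (PySem.List.index? pl v).map (fun n => (n : Int)) := by
  rw [rank_get v pl 0 PySem.Dict.empty, PySem.Dict.get?_empty]
  cases hix : PySem.List.index? pl v <;> simp

-- B's loop over the items decomposes into count / first / best over the matched values
theorem bfold_decomp (rank : PySem.Dict String Int) (style : String) :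
    ∀ (L : List (String × String)) (st : Nat × Option String × Option (Int × String)),
      L.foldl (bstepB rank style) st =
        (st.1 + ((L.filter (fun kv => PySem.Str.isIn kv.1 style)).map Prod.snd).length,
         (if st.1 = 0 then ((L.filter (fun kv => PySem.Str.isIn kv.1 style)).map Prod.snd).head?.or st.2.1 else st.2.1),
         ((L.filter (fun kv => PySem.Str.isIn kv.1 style)).map Prod.snd).foldl
           (fun b v => match rank.get? v with
             | none => b
             | some r => match b with
               | none => some (r, v)
               | some b0 => if r < b0.1 then some (r, v) else some b0) st.2.2) := by
  intro L
  induction L with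
  | nil =>
    intro st
    obtain ⟨c, f, b⟩ := st
    simp
  | cons kv t ih =>
    intro st
    obtain ⟨c, f, b⟩ := st
    rw [List.foldl_cons]
    by_cases hm : PySem.Str.isIn kv.1 style
    · rw [ih, List.filter_cons_of_pos (by simpa using hm)]
      simp only [bstepB, hm, if_true,
        List.map_cons, List.length_cons, List.head?_cons, List.foldl_cons]
      simp only [Prod.mk.injEq]
      refine ⟨by omega, ?_, ?_⟩
      · have h10 : c + 1 ≠ 0 := by omega
        rw [if_neg h10]
        by_cases hc : c = 0
        · subst hc; simp
        · have h11 : ((c + 1 : Nat) == 1) = false := by simp; omega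
          simp [hc, h11]
      · trivial
    · have hb : bstepB rank style (c, f, b) kv = (c, f, b) := by
        simp only [bstepB]; rw [if_neg hm]
      rw [hb, ih, List.filter_cons_of_neg (by simpa using eq_false_of_ne_true hm)]

-- once best = (0, p) it never changes (ranks are nonnegative)
theorem bmin_keep_zero (pl : List String) (p : String) :
    ∀ (M : List String), M.foldl (bminIdx pl) (some (0, p)) = some (0, p) := by
  intro M
  induction M with
  | nil => rfl
  | cons v t ih =>
    rw [List.foldl_cons]
    have hstep : bminIdx pl (some (0, p)) v = some (0, p) := by
      unfold bminIdx
      cases hix : PySem.List.index? pl v with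
      | none => rfl
      | some n =>
        have h : ¬ ((n : Int) < 0) := by omega
        simp [h]
    rw [hstep, ih]

-- if the head of the priority list is matched, the fold ends at (0, head)
theorem bmin_zero_wins (p : String) (rest : List String) :
    ∀ (M : List String) (b : Option (Int × String)),
      (∀ y, b = some y → 0 ≤ y.1 ∧ (y.1 = 0 → y.2 = p)) → p ∈ M →
      M.foldl (bminIdx (p :: rest)) b = some (0, p) := by
  intro M
  induction M with
  | nil => intro b _ h; exact absurd h (List.not_mem_nil)
  | cons v t ih =>
    intro b hb hp
    rw [List.foldl_cons]
    by_cases hv : v = p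
    · subst hv
      have hstep : bminIdx (v :: rest) b v = some (0, v) := by
        unfold bminIdx
        rw [PySem.List.index?_cons_self]
        cases b with
        | none => norm_num
        | some y =>
          obtain ⟨hy0, hy1⟩ := hb y rfl
          show (if ((0 : Nat) : Int) < y.1 then some (((0 : Nat) : Int), v) else some y) = some (0, v)
          by_cases hlt : ((0 : Nat) : Int) < y.1
          · rw [if_pos hlt]; norm_num
          · rw [if_neg hlt]
            have h0 : y.1 = 0 := by simp at hlt; omega
            have h2 := hy1 h0
            rw [← h2, ← h0]
      rw [hstep]
      exact bmin_keep_zero (v :: rest) v t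
    · have hp' : p ∈ t := by
        rcases List.mem_cons.mp hp with h | h
        · exact absurd h.symm hv
        · exact h
      apply ih _ _ hp'
      intro y hy
      unfold bminIdx at hy
      cases hix : PySem.List.index? (p :: rest) v with
      | none =>
        rw [hix] at hy; simp at hy
        exact hb y (by rw [hy])
      | some n =>
        rw [hix] at hy
        have hn0 : n ≠ 0 := by
          intro h0
          subst h0
          obtain ⟨hk, hv', -⟩ := PySem.List.getElem_of_index?_eq_some hix
          exact hv (by simpa using hv'.symm)
        cases b with
        | none =>
          replace hy : some (((n : Nat) : Int), v) = some y := hy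
          have hy' : y = (((n : Nat) : Int), v) := (Option.some.inj hy).symm
          constructor
          · rw [hy']; simp
          · intro h1
            rw [hy'] at h1
            simp at h1
            exact absurd h1 hn0
        | some y0 =>
          replace hy : (if ((n : Nat) : Int) < y0.1 then some (((n : Nat) : Int), v) else some y0) = some y := hy
          by_cases hlt : ((n : Nat) : Int) < y0.1
          · rw [if_pos hlt] at hy
            have hy' : y = (((n : Nat) : Int), v) := (Option.some.inj hy).symm
            constructor
            · rw [hy']; simp
            · intro h1
              rw [hy'] at h1
              simp at h1
              exact absurd h1 hn0
          · rw [if_neg hlt] at hy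
            exact hb y (Option.some.inj hy ▸ rfl)

-- if the head of the priority list is NOT matched, ranks shift by one
theorem bmin_shift (p : String) (rest : List String) :
    ∀ (M : List String) (b : Option (Int × String)), (∀ v ∈ M, v ≠ p) →
      M.foldl (bminIdx (p :: rest)) (b.map (fun y => (y.1 + 1, y.2)))
        = (M.foldl (bminIdx rest) b).map (fun y => (y.1 + 1, y.2)) := by
  intro M
  induction M with
  | nil => intro b _; rfl
  | cons v t ih =>
    intro b hne
    rw [List.foldl_cons, List.foldl_cons]
    have hstep : bminIdx (p :: rest) (b.map (fun y => (y.1 + 1, y.2))) v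
        = (bminIdx rest b v).map (fun y => (y.1 + 1, y.2)) := by
      unfold bminIdx
      rw [PySem.List.index?_cons_of_ne _ (fun h => (hne v (by simp)) h.symm)]
      cases hix : PySem.List.index? rest v with
      | none => rfl
      | some n =>
        simp only [Option.map_some]
        cases b with
        | none =>
          simp only [Option.map_none, Option.map_some]
          norm_num
        | some y0 =>
          simp only [Option.map_some]
          by_cases hlt : ((n : Nat) : Int) < y0.1
          · rw [if_pos hlt, if_pos (by push_cast; omega)]
            simp only [Option.map_some]
            norm_num
          · rw [if_neg hlt, if_neg (by push_cast; omega)]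
            rfl
    rw [hstep, ih _ (fun w hw => hne w (by simp [hw]))]

-- B's min-rank fold returns exactly A's first priority hit
theorem pickB : ∀ (pl M : List String), (∃ p ∈ pl, p ∈ M) →
    ∃ r, M.foldl (bminIdx pl) none = some (r, firstInA pl M) := by
  intro pl
  induction pl with
  | nil => rintro M ⟨p, hp, -⟩; exact absurd hp (List.not_mem_nil)
  | cons p rest ih =>
    intro M hEx
    by_cases hp : p ∈ M
    · refine ⟨0, ?_⟩
      have hA : firstInA (p :: rest) M = p := by
        have : M.contains p = true := by simpa using hp
        simp only [firstInA, this]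
        exact if_pos trivial
      rw [hA]
      exact bmin_zero_wins p rest M none (by intro y h; cases h) hp
    · have hEx' : ∃ q ∈ rest, q ∈ M := by
        obtain ⟨q, hq1, hq2⟩ := hEx
        rcases List.mem_cons.mp hq1 with h | h
        · exact absurd (h ▸ hq2) hp
        · exact ⟨q, h, hq2⟩
      obtain ⟨r, hr⟩ := ih M hEx'
      refine ⟨r + 1, ?_⟩
      have hA : firstInA (p :: rest) M = firstInA rest M := by
        have hc : M.contains p = false := by
          simp only [List.contains_eq_mem, decide_eq_false_iff_not]; exact hp
        simp only [firstInA, hc]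
        exact if_neg (by simp)
      have := bmin_shift p rest M none (fun v hv => fun h => hp (h ▸ hv))
      simp only [Option.map_none] at this
      rw [this, hr, hA]
      rfl

-- ===== VERDICT (by name: the statement is the Claim_ definition above) =====
theorem categorize_style_spec : Claim_equal_categorize_style := by
  intro style sd pl _ hpre
  unfold Spec_categorize_style categorize_style categorize_style_alt
  simp only []
  set d := PySem.Dict.ofList sd with hd
  set mtch := (d.items.filter (fun kv => PySem.Str.isIn kv.1 style)).map Prod.snd with hmtch
  have hndk : d.keys.Nodup := PySem.Dict.nodup_keys_ofList sd
  -- the initial all-False dict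
  have hmd0 : (PySem.Dict.ofList (d.keys.map (fun k => (k, false)))).items
      = d.keys.map (fun k => (k, false)) := by
    have hof : PySem.Dict.ofList (d.keys.map (fun k => (k, false)))
        = (d.keys.map (fun k => (k, false))).foldl (fun m a => m.insert a.1 a.2) PySem.Dict.empty :=
      PySem.Dict.ext_iff.mpr rfl
    rw [hof]
    rw [PySem.Dict.items_foldl_insert_fresh _ _ _ _ (by simp)
      (by simpa [Function.comp_def] using hndk)]
    simp [Function.comp_def, PySem.Dict.empty]
  -- the updated dict after the flag loop
  have hmd : (d.keys.foldl (fun m k => if PySem.Str.isIn k style then m.insert k true else m)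
        (PySem.Dict.ofList (d.keys.map (fun k => (k, false))))).items
      = d.keys.map (fun k => (k, PySem.Str.isIn k style)) :=
    md_loop_items (fun k => PySem.Str.isIn k style) d.keys [] _ (by simpa using hmd0)
      (by simpa using hndk)
  set md := d.keys.foldl (fun m k => if PySem.Str.isIn k style then m.insert k true else m)
      (PySem.Dict.ofList (d.keys.map (fun k => (k, false)))) with hmddef
  have hkeysmd : md.keys = d.keys := by
    simp only [PySem.Dict.keys, hmd, List.map_map]; simp
  have hndmd : md.keys.Nodup := by rw [hkeysmd]; exact hndk
  have hvals : md.values = d.keys.map (fun k => PySem.Str.isIn k style) := by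
    simp only [PySem.Dict.values, hmd, List.map_map]; simp
  have hgetmd : ∀ k ∈ d.keys, md.getD k false = PySem.Str.isIn k style := by
    intro k hk
    have : (k, PySem.Str.isIn k style) ∈ md.items := by
      rw [hmd]; exact List.mem_map.mpr ⟨k, hk, rfl⟩
    exact getD_of_mem_items_nodup md (k, PySem.Str.isIn k style) this hndmd false
  have hgetd : ∀ kv ∈ d.items, d.getD kv.1 "" = kv.2 := by
    intro kv hkv; exact getD_of_mem_items_nodup d kv hkv hndk ""
  -- A's options list is B's matched-value list
  have hopts : (md.keys.filter (fun k => md.getD k false)).map (fun k => d.getD k "") = mtch := by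
    have hfiltermd : md.keys.filter (fun k => md.getD k false)
        = d.keys.filter (fun k => PySem.Str.isIn k style) := by
      rw [hkeysmd]; apply List.filter_congr; intro k hk; rw [hgetmd k hk]
    rw [hmtch, hfiltermd, show d.keys = d.items.map Prod.fst from rfl]
    exact options_eq_matched _ _ d.items hgetd
  -- A's any-test is B's count == 0 test
  have he : (!(md.values.any (fun b => b))) = mtch.isEmpty := by
    rw [Bool.eq_iff_iff, hvals, hmtch]
    simp only [Bool.not_eq_eq_eq_not, Bool.not_true, List.any_map, List.any_eq_false,
      List.isEmpty_iff, List.map_eq_nil_iff, List.filter_eq_nil_iff, Function.comp]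
    constructor
    · intro h kv hkv
      exact h kv.1 (List.mem_map.mpr ⟨kv, hkv, rfl⟩)
    · intro h k hk
      obtain ⟨kv, hkv, rfl⟩ := List.mem_map.mp hk
      exact h kv hkv
  -- B's loop: decompose into count / first / best over mtch
  set rank := (PySem.List.enumerate pl 0).foldl (fun d ip => d.setdefault ip.2 ip.1)
      (PySem.Dict.empty : PySem.Dict String Int) with hrank
  have hfun : (fun (b : Option (Int × String)) (v : String) =>
      (match rank.get? v with
        | none => b
        | some r => match b with
          | none => some (r, v)
          | some b0 => if r < b0.1 then some (r, v) else some b0)) = bminIdx pl := by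
    funext b v
    rw [hrank, rank_get0]
    unfold bminIdx
    cases hix : PySem.List.index? pl v with
    | none => rfl
    | some n => rfl
  have hst2 : List.foldl (bstepB rank style) (0, none, none) d.items
      = (mtch.length, mtch.head?, mtch.foldl (bminIdx pl) none) := by
    rw [bfold_decomp rank style d.items (0, none, none), hfun, ← hmtch]
    dsimp only
    rw [Nat.zero_add, Option.or_none]
    simp
  rw [hst2, hopts, he]
  dsimp only
  by_cases h1 : mtch = []
  · rw [h1]
    rfl
  · have hne : mtch.isEmpty = false := by simpa [List.isEmpty_iff] using h1
    have hlp : 0 < mtch.length := List.length_pos_of_ne_nil h1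
    rw [hne]
    have h0f : ((mtch.length : Nat) == 0) = false := by simp; omega
    rw [h0f]
    simp only [Bool.false_eq_true, if_false]
    by_cases h2 : mtch.length = 1
    · obtain ⟨v, hv⟩ := List.length_eq_one_iff.mp h2
      rw [hv]
      simp [PySem.List.pyGet?, PySem.List.pyIdx?]
    · have h2A : ((mtch.length : Nat) == 1) = false := by simp; omega
      rw [h2A]
      simp only [Bool.false_eq_true, if_false]
      -- Pre_ supplies a matched value in priority_list here
      have hEx : ∃ p ∈ pl, p ∈ mtch := by
        rcases hpre with h | h
        · have h' : mtch.length ≤ 1 := by rw [hmtch, hd]; exact h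
          omega
        · exact h
      obtain ⟨r, hr⟩ := pickB pl mtch hEx
      rw [hr]
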